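-- pv_equiv track=rewrite | github.com/NortonFire007/PythonCourse | homework1/var12/var12.py | remove_rows_and_columns
-- ===== SOURCE A (Python) =====
-- def remove_rows_and_columns(matrix, value):
--     rows_to_delete = []
--     columns_to_delete = set()
--
--     for i in range(len(matrix)):
--         for j in range(len(matrix[i])):
--             if matrix[i][j] == value:
--                 rows_to_delete.append(i)
--                 columns_to_delete.add(j)
--     return [
--         [sub_val for j, sub_val in enumerate(val) if j not in columns_to_delete]
--         for i, val in enumerate(matrix) if i not in rows_to_delete
--     ]
-- ===== SOURCE B (Python) =====
-- def remove_rows_and_columns(matrix, value):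
--     width = 0
--     for row in matrix:
--         width = max(width, len(row))
--     bad = [any(j < len(row) and row[j] == value for row in matrix)
--            for j in range(width)]
--     return [[x for j, x in enumerate(row) if not bad[j]]
--             for row in matrix if value not in row]
-- ===== Notes on version B (the rewrite author's own statement) =====
-- stated objective: alternative
-- what changed: A records row and column indices to delete in one combined nested cell scan and then filters both dimensions by index membership; B instead filters rows by a direct 'value in row' membership test and computes the deleted-column flags by an independent column-major scan (any row hit at column j) over a precomputed width.
import Mathlib
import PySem

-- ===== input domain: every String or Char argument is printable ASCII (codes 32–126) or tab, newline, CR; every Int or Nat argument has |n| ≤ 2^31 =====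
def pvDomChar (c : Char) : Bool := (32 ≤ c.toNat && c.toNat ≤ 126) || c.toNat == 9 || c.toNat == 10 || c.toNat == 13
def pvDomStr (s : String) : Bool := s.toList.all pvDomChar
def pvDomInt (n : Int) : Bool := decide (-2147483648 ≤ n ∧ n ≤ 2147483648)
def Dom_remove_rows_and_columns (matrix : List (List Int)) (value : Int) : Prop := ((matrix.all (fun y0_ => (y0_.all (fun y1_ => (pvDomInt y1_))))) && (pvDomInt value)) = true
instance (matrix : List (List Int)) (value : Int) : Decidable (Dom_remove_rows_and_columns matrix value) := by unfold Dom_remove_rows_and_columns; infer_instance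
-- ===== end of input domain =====

-- B replaces A's combined cell scan (recording row and column indices together in one
-- nested loop) by a per-row membership test plus an independent column-major scan; objective: alternative decomposition.

-- ===== PORT A =====
def remove_rows_and_columns (matrix : List (List Int)) (value : Int) : List (List Int) :=
  let st : List Int × PySem.Set Int :=
    (PySem.List.pyRange 0 matrix.length 1).foldl
      (fun st i =>
        let row := PySem.List.pyGetD matrix i []
        (PySem.List.pyRange 0 row.length 1).foldl
          (fun st j =>
            if PySem.List.pyGetD row j 0 = value then (st.1 ++ [i], st.2.add j) else st)
          st)
      ([], PySem.Set.empty)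
  ((PySem.List.enumerate matrix 0).filter (fun p => ¬ p.1 ∈ st.1)).map
    (fun p => ((PySem.List.enumerate p.2 0).filter (fun q => ¬ q.1 ∈ st.2)).map (·.2))

-- ===== PORT B =====
def remove_rows_and_columns_alt (matrix : List (List Int)) (value : Int) : List (List Int) :=
  let width : Int := matrix.foldl (fun acc row => max acc (row.length : Int)) 0
  let bad : List Bool := (PySem.List.pyRange 0 width 1).map
    (fun j => matrix.any (fun row => decide (j < (row.length : Int)) && decide (PySem.List.pyGetD row j 0 = value)))
  (matrix.filter (fun row => ¬ value ∈ row)).map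
    (fun row => ((PySem.List.enumerate row 0).filter
        (fun q => ¬ PySem.List.pyGetD bad q.1 false)).map (·.2))

-- ===== PRECONDITION & SPEC =====
def Spec_remove_rows_and_columns (matrix : List (List Int)) (value : Int) (out : List (List Int)) : Prop := out = remove_rows_and_columns_alt matrix value
instance (matrix : List (List Int)) (value : Int) (out : List (List Int)) : Decidable (Spec_remove_rows_and_columns matrix value out) := by unfold Spec_remove_rows_and_columns; infer_instance

-- ===== CLAIM (what is proved, stated in full; the proofs are below) =====
def Claim_equal_remove_rows_and_columns : Prop := ∀ (matrix : List (List Int)) (value : Int), Dom_remove_rows_and_columns matrix value → Spec_remove_rows_and_columns matrix value (remove_rows_and_columns matrix value)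

-- ===== LEMMAS AND PROOFS =====

-- A's inner loop over one row: membership characterisation of both state components.
theorem inner_fold_mem (row : List Int) (value i : Int) :
    ∀ (js : List Int) (st : List Int × PySem.Set Int),
      (∀ k, k ∈ (js.foldl (fun st j => if PySem.List.pyGetD row j 0 = value then (st.1 ++ [i], st.2.add j) else st) st).1 ↔
        k ∈ st.1 ∨ (k = i ∧ ∃ j ∈ js, PySem.List.pyGetD row j 0 = value)) ∧
      (∀ j, j ∈ (js.foldl (fun st j => if PySem.List.pyGetD row j 0 = value then (st.1 ++ [i], st.2.add j) else st) st).2 ↔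
        j ∈ st.2 ∨ (j ∈ js ∧ PySem.List.pyGetD row j 0 = value)) := by
  intro js
  induction js with
  | nil => simp
  | cons j js ih =>
    intro st
    constructor
    · intro k
      simp only [List.foldl_cons]
      rw [(ih _).1]
      by_cases h : PySem.List.pyGetD row j 0 = value <;>
        simp [h] <;> tauto
    · intro x
      simp only [List.foldl_cons]
      rw [(ih _).2]
      rcases eq_or_ne x j with rfl | hxj
      · by_cases h : PySem.List.pyGetD row x 0 = value <;>
          simp [h, PySem.Set.mem_add]
      · by_cases h : PySem.List.pyGetD row j 0 = value <;>
          simp [h, PySem.Set.mem_add, hxj]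

-- A value occurs in a row iff some in-range index hits it.
theorem mem_row_iff (row : List Int) (value : Int) :
    (value ∈ row) ↔ ∃ j ∈ PySem.List.pyRange 0 (row.length : Int) 1, PySem.List.pyGetD row j 0 = value := by
  constructor
  · intro h
    obtain ⟨k, hk, he⟩ := List.mem_iff_getElem.1 h
    refine ⟨(k : Int), ?_, ?_⟩
    · rw [PySem.List.mem_pyRange_one]; omega
    · rw [PySem.List.pyGetD_natCast]; simp [List.getD, hk, he]
  · rintro ⟨j, hj, he⟩
    rw [PySem.List.mem_pyRange_one] at hj
    obtain ⟨k, rfl⟩ : ∃ k : Nat, j = (k : Int) := ⟨j.toNat, by omega⟩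
    rw [PySem.List.pyGetD_natCast] at he
    have hk : k < row.length := by exact_mod_cast hj.2
    rw [List.getD_eq_getElem _ _ hk] at he
    exact he ▸ List.getElem_mem hk

-- A's outer loop: membership characterisation of the final state.
theorem outer_fold_mem (matrix : List (List Int)) (value : Int) :
    ∀ (is : List Int) (st : List Int × PySem.Set Int),
      (∀ k, k ∈ (is.foldl (fun st i =>
          let row := PySem.List.pyGetD matrix i []
          (PySem.List.pyRange 0 (row.length : Int) 1).foldl
            (fun st j => if PySem.List.pyGetD row j 0 = value then (st.1 ++ [i], st.2.add j) else st) st) st).1 ↔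
        k ∈ st.1 ∨ (k ∈ is ∧ value ∈ PySem.List.pyGetD matrix k [])) ∧
      (∀ j, j ∈ (is.foldl (fun st i =>
          let row := PySem.List.pyGetD matrix i []
          (PySem.List.pyRange 0 (row.length : Int) 1).foldl
            (fun st j => if PySem.List.pyGetD row j 0 = value then (st.1 ++ [i], st.2.add j) else st) st) st).2 ↔
        j ∈ st.2 ∨ ∃ i ∈ is, 0 ≤ j ∧ j < ((PySem.List.pyGetD matrix i []).length : Int) ∧
          PySem.List.pyGetD (PySem.List.pyGetD matrix i []) j 0 = value) := by
  intro is
  induction is with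
  | nil => simp
  | cons i is ih =>
    intro st
    constructor
    · intro k
      simp only [List.foldl_cons]
      rw [(ih _).1, (inner_fold_mem _ _ _ _ _).1, ← mem_row_iff]
      constructor
      · rintro (⟨h | ⟨rfl, h⟩⟩ | ⟨h1, h2⟩)
        · exact Or.inl h
        · exact Or.inr ⟨List.mem_cons_self, h⟩
        · exact Or.inr ⟨List.mem_cons_of_mem _ h1, h2⟩
      · rintro (h | ⟨h1, h2⟩)
        · exact Or.inl (Or.inl h)
        · rcases List.mem_cons.1 h1 with rfl | h1
          · exact Or.inl (Or.inr ⟨rfl, h2⟩)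
          · exact Or.inr ⟨h1, h2⟩
    · intro j
      simp only [List.foldl_cons]
      rw [(ih _).2, (inner_fold_mem _ _ _ _ _).2]
      simp only [PySem.List.mem_pyRange_one]
      constructor
      · rintro (⟨h | ⟨⟨h1, h2⟩, h3⟩⟩ | ⟨i', hi', h⟩)
        · exact Or.inl h
        · exact Or.inr ⟨i, List.mem_cons_self, h1, h2, h3⟩
        · exact Or.inr ⟨i', List.mem_cons_of_mem _ hi', h⟩
      · rintro (h | ⟨i', hi', h1, h2, h3⟩)
        · exact Or.inl (Or.inl h)
        · rcases List.mem_cons.1 hi' with rfl | hi'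
          · exact Or.inl (Or.inr ⟨⟨h1, h2⟩, h3⟩)
          · exact Or.inr ⟨i', hi', h1, h2, h3⟩

-- enumerate-filter-map where predicate and map depend only on the element.
theorem enum_filter_map {α β : Type} (q : α → Bool) (f : α → β) :
    ∀ (l : List α) (s : Int),
      ((PySem.List.enumerate l s).filter (fun p => q p.2)).map (fun p => f p.2) =
        (l.filter q).map f := by
  intro l
  induction l with
  | nil => simp [PySem.List.enumerate]
  | cons x xs ih =>
    intro s
    rw [PySem.List.enumerate_cons]
    by_cases h : q x <;> simp [h, ih]

-- index lookup on a list at a Nat-cast in-range index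
theorem pyGetD_at_nat {α : Type} (xs : List α) (k : Nat) (hk : k < xs.length) (d : α) :
    PySem.List.pyGetD xs (k : Int) d = xs[k] := by
  rw [PySem.List.pyGetD_natCast, List.getD_eq_getElem _ _ hk]

-- the column condition stated over row indices equals the same condition stated over rows
theorem col_flag_iff (matrix : List (List Int)) (value j : Int) :
    (∃ i ∈ PySem.List.pyRange 0 (matrix.length : Int) 1,
        0 ≤ j ∧ j < ((PySem.List.pyGetD matrix i []).length : Int) ∧
        PySem.List.pyGetD (PySem.List.pyGetD matrix i []) j 0 = value) ↔
      (0 ≤ j ∧ ∃ row ∈ matrix, j < (row.length : Int) ∧ PySem.List.pyGetD row j 0 = value) := by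
  constructor
  · rintro ⟨i, hi, h0, hlt, he⟩
    rw [PySem.List.mem_pyRange_one] at hi
    obtain ⟨k, rfl⟩ : ∃ k : Nat, i = (k : Int) := ⟨i.toNat, by omega⟩
    have hk : k < matrix.length := by exact_mod_cast hi.2
    rw [pyGetD_at_nat _ _ hk] at hlt he
    exact ⟨h0, matrix[k], List.getElem_mem hk, hlt, he⟩
  · rintro ⟨h0, row, hrow, hlt, he⟩
    obtain ⟨k, hk, rfl⟩ := List.mem_iff_getElem.1 hrow
    refine ⟨(k : Int), ?_, h0, ?_, ?_⟩
    · rw [PySem.List.mem_pyRange_one]; omega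
    · rw [pyGetD_at_nat _ _ hk]; exact hlt
    · rw [pyGetD_at_nat _ _ hk]; exact he

-- ===== VERDICT (by name: the statement is the Claim_ definition above) =====
theorem remove_rows_and_columns_spec : Claim_equal_remove_rows_and_columns := by
  intro matrix value _
  unfold Spec_remove_rows_and_columns
  simp only [remove_rows_and_columns, remove_rows_and_columns_alt]
  obtain ⟨hrows, hcols⟩ :=
    outer_fold_mem matrix value (PySem.List.pyRange 0 (matrix.length : Int) 1)
      ([], PySem.Set.empty)
  rw [List.filter_congr (q := fun p : Int × List Int => decide (¬ value ∈ p.2)) ?_]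
  · refine (enum_filter_map (fun row => decide (value ∉ row))
      (fun row => List.map (fun x => x.2)
        (List.filter
          (fun q => decide (q.1 ∉
            (List.foldl
              (fun st i =>
                List.foldl
                  (fun st j =>
                    if PySem.List.pyGetD (PySem.List.pyGetD matrix i []) j 0 = value then
                      (st.1 ++ [i], st.2.add j)
                    else st)
                  st (PySem.List.pyRange 0 ((PySem.List.pyGetD matrix i []).length : Int)))
              (([] : List Int), PySem.Set.empty) (PySem.List.pyRange 0 (matrix.length : Int))).2))
          (PySem.List.enumerate row 0))) matrix 0).trans ?_
    refine List.map_congr_left ?_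
    intro row hrowf
    have hrow : row ∈ matrix := List.mem_of_mem_filter hrowf
    rw [List.filter_congr ?_]
    intro q hq
    obtain ⟨k, hk, rfl⟩ := (PySem.List.mem_enumerate_iff _ _ _).1 hq
    simp only [zero_add, decide_eq_decide, not_iff_not]
    rw [hcols]
    have hwidth : (row.length : Int) ≤
        matrix.foldl (fun acc r => max acc ((r.length : Int))) 0 :=
      (PySem.List.le_foldl_max_int matrix (fun r => (r.length : Int)) 0).2 row hrow
    rw [PySem.List.pyGetD_map_pyRange_of_nonneg _ _ _ _ (by omega) (by omega)]
    rw [col_flag_iff]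
    simp only [PySem.Set.empty, List.not_mem_nil, false_or, List.any_eq_true,
      Bool.and_eq_true, decide_eq_true_eq]
    constructor
    · rintro ⟨h0, r, hr, h1, h2⟩; exact ⟨r, hr, h1, h2⟩
    · rintro ⟨r, hr, h1, h2⟩; exact ⟨by omega, r, hr, h1, h2⟩
  · intro p hp
    obtain ⟨k, hk, rfl⟩ := (PySem.List.mem_enumerate_iff _ _ _).1 hp
    simp only [zero_add, decide_eq_decide, not_iff_not]
    rw [hrows]
    simp only [List.not_mem_nil, false_or]
    rw [pyGetD_at_nat _ _ hk]
    simp [PySem.List.mem_pyRange_one]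
    omega
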